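-- pv_equiv track=rewrite | github.com/sungw00ng/solved | 프로그래머스/Lv. 2/귤 고르기.py | solution
-- ===== SOURCE A (Python) =====
-- def solution(k, tangerine):
--     dic={}
--     cnt=0
--     for i in tangerine:
--         if i in dic:
--             dic[i]+=1
--         else:
--             dic[i]=1
--     lst=sorted(dic.items(), key=lambda item:item[1],reverse=True)
--     for i,tup in enumerate(lst):
--         #튜플 반환
--         k-=lst[i][1]
--         if k<=0:
--             return i+1
-- ===== SOURCE B (Python) =====
-- def solution(k, tangerine):
--     # counting-sort style: bucket the frequencies instead of sorting them
--     freq = {}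
--     for t in tangerine:
--         freq[t] = freq.get(t, 0) + 1
--     buckets = {}
--     for c in freq.values():
--         buckets[c] = buckets.get(c, 0) + 1
--     kinds = 0
--     for c in range(len(tangerine), 0, -1):
--         m = buckets.get(c, 0)
--         if m == 0:
--             continue
--         if k - m * c <= 0:
--             # just enough sizes of this frequency (at least one)
--             return kinds + max(1, -(-k // c))
--         k -= m * c
--         kinds += m
-- ===== Notes on version B (the rewrite author's own statement) =====
-- stated objective: alternative
-- what changed: B replaces A's comparison sort of the (size, frequency) pairs by counting-sort style frequency buckets swept from the highest possible frequency down, jumping over each bucket with one ceil-division instead of scanning it element by element.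
-- outside the precondition, e.g. on solution(3, [1, 1]): A returns None, B returns None; on solution(1, []): A returns None, B returns None
import Mathlib
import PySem

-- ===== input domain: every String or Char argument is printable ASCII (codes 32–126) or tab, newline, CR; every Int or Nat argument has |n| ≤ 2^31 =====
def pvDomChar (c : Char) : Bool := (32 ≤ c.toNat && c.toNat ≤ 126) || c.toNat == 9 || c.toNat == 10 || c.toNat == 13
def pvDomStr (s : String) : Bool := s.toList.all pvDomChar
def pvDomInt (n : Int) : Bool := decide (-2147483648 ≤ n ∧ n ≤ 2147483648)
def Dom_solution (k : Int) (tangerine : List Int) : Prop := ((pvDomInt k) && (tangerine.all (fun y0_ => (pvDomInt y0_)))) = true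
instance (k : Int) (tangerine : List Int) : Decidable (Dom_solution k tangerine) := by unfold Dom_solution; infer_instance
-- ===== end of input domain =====

-- B replaces A's sort of the frequency table by frequency buckets swept from the highest
-- possible count downwards (counting-sort style), jumping over each bucket arithmetically.

-- ===== PORT A =====
-- the 'for i,tup in enumerate(lst): k -= lst[i][1]; if k<=0: return i+1' loop
-- (lst[i] is the current element tup); none = the Python loop falls through (returns None)
def pvLoopA : Int → Int → List (Int × Int) → Option Int
  | _, _, [] => none
  | k, i, t :: rest =>
    if k - t.2 ≤ 0 then some (i + 1) else pvLoopA (k - t.2) (i + 1) rest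

def solution (k : Int) (tangerine : List Int) : Int :=
  let dic := tangerine.foldl
    (fun d i => if d.contains i then d.modify i 0 (· + 1) else d.insert i 1) PySem.Dict.empty
  let lst := PySem.List.sorted dic.items (fun item => item.2) true
  (pvLoopA k 0 lst).getD 0   -- Pre_ excludes the fall-through (Python returns None there)

-- ===== PORT B =====
-- the 'for c in range(len(tangerine), 0, -1): …' loop of Source B
def pvLoopB : Int → Int → PySem.Dict Int Int → List Int → Option Int
  | _, _, _, [] => none
  | k, kinds, buckets, c :: cs =>
    let m := buckets.getD c 0
    if m == 0 then pvLoopB k kinds buckets cs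
    else if k - m * c ≤ 0 then
      some (kinds + max 1 (-(PySem.Int.floordiv (-k) c)))
    else pvLoopB (k - m * c) (kinds + m) buckets cs

def solution_alt (k : Int) (tangerine : List Int) : Int :=
  let freq := tangerine.foldl (fun d t => d.insert t (d.getD t 0 + 1)) PySem.Dict.empty
  let buckets := freq.values.foldl (fun d c => d.insert c (d.getD c 0 + 1)) PySem.Dict.empty
  (pvLoopB k 0 buckets (PySem.List.pyRange (tangerine.length : Int) 0 (-1))).getD 0

-- ===== PRECONDITION & SPEC =====
-- Pre_ excludes exactly the inputs on which the Python A (and B) falls off the loop and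
-- returns None instead of an int: the empty list, and k larger than the number of fruits.
def Pre_solution (k : Int) (tangerine : List Int) : Prop :=
  tangerine ≠ [] ∧ k ≤ (tangerine.length : Int)
instance (k : Int) (tangerine : List Int) : Decidable (Pre_solution k tangerine) := by
  unfold Pre_solution; infer_instance

def pvWitness_solution : Int × List Int := (2, [1, 1, 2])

def Spec_solution (k : Int) (tangerine : List Int) (out : Int) : Prop := out = solution_alt k tangerine
instance (k : Int) (tangerine : List Int) (out : Int) : Decidable (Spec_solution k tangerine out) := by unfold Spec_solution; infer_instance

-- ===== CLAIM (what is proved, stated in full; the proofs are below) =====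
def Claim_equal_solution : Prop := ∀ (k : Int) (tangerine : List Int), Dom_solution k tangerine → Pre_solution k tangerine → Spec_solution k tangerine (solution k tangerine)

-- ===== LEMMAS AND PROOFS =====

-- the common abstract loop: scan a list of counts, return how many are needed to cover k
def pvAns : Int → List Int → Option Int
  | _, [] => none
  | k, c :: cs => if k - c ≤ 0 then some 1 else (pvAns (k - c) cs).map (· + 1)

lemma pvLoopA_eq (l : List (Int × Int)) : ∀ k i : Int,
    pvLoopA k i l = (pvAns k (l.map Prod.snd)).map (· + i) := by
  induction l with
  | nil => intro k i; rfl
  | cons t rest ih =>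
    intro k i
    simp only [pvLoopA, pvAns, List.map_cons]
    by_cases h : k - t.2 ≤ 0
    · simp only [if_pos h, Option.map_some, Option.some.injEq]
      omega
    · rw [if_neg h, if_neg h, ih, Option.map_map]
      congr 1
      funext x
      simp only [Function.comp_apply]
      omega

lemma pvCeil_bracket {k c : Int} (hc : 0 < c) :
    (-(PySem.Int.floordiv (-k) c) - 1) * c < k ∧ k ≤ -(PySem.Int.floordiv (-k) c) * c :=
  (PySem.Int.neg_floordiv_neg_eq_iff_of_pos hc).mp rfl

lemma pvAns_replicate_le {c : Int} (hc : 0 < c) :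
    ∀ (m : Nat), 0 < m → ∀ {k : Int}, k - (m : Int) * c ≤ 0 → ∀ cs,
      pvAns k (List.replicate m c ++ cs) = some (max 1 (-(PySem.Int.floordiv (-k) c))) := by
  intro m
  induction m with
  | zero => intro h; exact absurd h (lt_irrefl 0)
  | succ m ih =>
    intro _ k hk cs
    rw [List.replicate_succ, List.cons_append]
    simp only [pvAns]
    by_cases h : k - c ≤ 0
    · rw [if_pos h]
      have hb := pvCeil_bracket (k := k) hc
      have hq1 : -(PySem.Int.floordiv (-k) c) ≤ 1 := by nlinarith [hb.1]
      simp only [Option.some.injEq]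
      omega
    · rw [if_neg h]
      have hm' : 0 < m := by
        rcases Nat.eq_zero_or_pos m with h0 | h0
        · subst h0; push_cast at hk; omega
        · exact h0
      have hk' : (k - c) - (m : Int) * c ≤ 0 := by push_cast at hk; nlinarith
      rw [ih hm' hk' cs]
      have hb := pvCeil_bracket (k := k - c) hc
      have hkc : 0 < k - c := by omega
      have hge : 1 ≤ -(PySem.Int.floordiv (-(k - c)) c) := by nlinarith [hb.2]
      have hq : -(PySem.Int.floordiv (-k) c) = -(PySem.Int.floordiv (-(k - c)) c) + 1 := by
        rw [PySem.Int.neg_floordiv_neg_eq_iff_of_pos hc]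
        constructor <;> nlinarith [hb.1, hb.2]
      simp only [Option.map_some, Option.some.injEq]
      omega

lemma pvAns_replicate_gt {c : Int} (hc : 0 < c) :
    ∀ (m : Nat) {k : Int}, 0 < k - (m : Int) * c → ∀ cs,
      pvAns k (List.replicate m c ++ cs)
        = (pvAns (k - (m : Int) * c) cs).map (· + (m : Int)) := by
  intro m
  induction m with
  | zero =>
    intro k _ cs
    simp only [List.replicate_zero, List.nil_append, Nat.cast_zero, zero_mul, sub_zero]
    cases pvAns k cs <;> simp
  | succ m ih =>
    intro k hk cs
    have hmc : 0 ≤ (m : Int) * c := mul_nonneg (Int.natCast_nonneg m) hc.le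
    have hkc : ¬ (k - c ≤ 0) := by push_cast at hk; nlinarith
    rw [List.replicate_succ, List.cons_append]
    simp only [pvAns]
    rw [if_neg hkc, ih (by push_cast at hk ⊢; nlinarith) cs, Option.map_map]
    have harg : k - c - (m : Int) * c = k - ((m + 1 : Nat) : Int) * c := by push_cast; ring
    rw [harg]
    congr 1
    funext x
    simp only [Function.comp_apply]
    push_cast
    ring

lemma pvLoopB_eq (buckets : PySem.Dict Int Int)
    (hnn : ∀ c, 0 ≤ buckets.getD c 0) :
    ∀ (cs : List Int), (∀ c ∈ cs, 0 < c) → ∀ (k kinds : Int),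
      pvLoopB k kinds buckets cs
        = (pvAns k (cs.flatMap (fun c => List.replicate (buckets.getD c 0).toNat c))).map (· + kinds) := by
  intro cs
  induction cs with
  | nil => intro _ k kinds; rfl
  | cons c cs ih =>
    intro hpos k kinds
    have hc : 0 < c := hpos c (List.mem_cons_self ..)
    have hcs : ∀ c' ∈ cs, 0 < c' := fun c' h => hpos c' (List.mem_cons_of_mem _ h)
    simp only [pvLoopB, List.flatMap_cons]
    by_cases hm : buckets.getD c 0 = 0
    · rw [if_pos (by simp [hm])]
      rw [hm]
      simp only [Int.toNat_zero, List.replicate_zero, List.nil_append]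
      exact ih hcs k kinds
    · have hmpos : 0 < buckets.getD c 0 := lt_of_le_of_ne (hnn c) (Ne.symm hm)
      have hcast : ((buckets.getD c 0).toNat : Int) = buckets.getD c 0 := Int.toNat_of_nonneg (hnn c)
      rw [if_neg (by simp [hm])]
      by_cases hk : k - buckets.getD c 0 * c ≤ 0
      · rw [if_pos hk]
        rw [pvAns_replicate_le hc _ (by omega) (by rw [hcast]; exact hk)]
        simp only [Option.map_some, Option.some.injEq]
        exact add_comm _ _
      · rw [if_neg hk]
        rw [pvAns_replicate_gt hc _ (by rw [hcast]; omega)]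
        rw [Option.map_map, hcast, ih hcs]
        congr 1
        funext x
        simp only [Function.comp_apply]
        ring

-- counting-sort permutation: concatenating, for each c of a duplicate-free list cs covering
-- vs, count-of-c copies of c is a permutation of vs
lemma pvCountPerm : ∀ (vs cs : List Int), cs.Nodup → (∀ v ∈ vs, v ∈ cs) →
    (cs.flatMap (fun c => List.replicate (vs.count c) c)).Perm vs := by
  intro vs
  induction vs with
  | nil => intro cs _ _; simp
  | cons x vs ih =>
    intro cs hnd hmem
    obtain ⟨l1, l2, rfl⟩ := List.append_of_mem (hmem x (List.mem_cons_self ..))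
    have hx : x ∉ l1 ++ l2 := (List.nodup_cons.mp (List.nodup_middle.mp hnd)).1
    have e1 : ∀ l : List Int, x ∉ l →
        l.flatMap (fun c => List.replicate ((x :: vs).count c) c)
          = l.flatMap (fun c => List.replicate (vs.count c) c) := by
      intro l hxl
      simp only [List.flatMap_def]
      refine congrArg List.flatten (List.map_congr_left ?_)
      intro a ha
      have : a ≠ x := fun h => hxl (h ▸ ha)
      rw [List.count_cons_of_ne this.symm]
    rw [List.flatMap_append, List.flatMap_cons,
        e1 l1 (fun h => hx (List.mem_append.mpr (Or.inl h))),
        e1 l2 (fun h => hx (List.mem_append.mpr (Or.inr h))),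
        List.count_cons_self, List.replicate_succ]
    simp only [List.cons_append]
    refine List.Perm.trans List.perm_middle (List.Perm.cons x ?_)
    have hih := ih (l1 ++ x :: l2) hnd (fun v hv => hmem v (List.mem_cons_of_mem _ hv))
    rw [List.flatMap_append, List.flatMap_cons] at hih
    simpa [List.append_assoc] using hih

lemma pvPairwiseFlat (f : Int → Nat) :
    ∀ (cs : List Int), cs.Pairwise (· > ·) →
      (cs.flatMap (fun c => List.replicate (f c) c)).Pairwise (· ≥ ·) := by
  intro cs
  induction cs with
  | nil => intro _; simp
  | cons c cs ih =>
    intro h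
    obtain ⟨hhead, htail⟩ := List.pairwise_cons.mp h
    rw [List.flatMap_cons, List.pairwise_append]
    refine ⟨List.pairwise_replicate.mpr (by simp), ih htail, ?_⟩
    intro a ha b hb
    obtain ⟨c', hc', hb'⟩ := List.mem_flatMap.mp hb
    rw [List.eq_of_mem_replicate ha, List.eq_of_mem_replicate hb']
    exact le_of_lt (hhead c' hc')

lemma pvPyRange_desc (N : Int) :
    PySem.List.pyRange N 0 (-1) = (List.range N.toNat).map (fun (j : Nat) => N - (j : Int)) := by
  simp only [PySem.List.pyRange]
  rw [if_neg (by norm_num : ¬ (-1 : Int) = 0), if_neg (by norm_num : ¬ (0 : Int) < -1)]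
  by_cases hN : (0 : Int) < N
  · rw [if_pos hN]
    have h1 : ((N - 0 + - -1 - 1) / - -1).toNat = N.toNat := by norm_num
    rw [h1]
    refine List.map_congr_left ?_
    intro a _
    ring
  · rw [if_neg hN]
    have h0 : N.toNat = 0 := by omega
    rw [h0]
    simp

lemma pvDesc_pairwise (N : Int) :
    ((List.range N.toNat).map (fun (j : Nat) => N - (j : Int))).Pairwise (· > ·) := by
  rw [List.pairwise_map]
  refine List.pairwise_lt_range.imp ?_
  intro a b h
  omega

lemma pvDesc_mem {N v : Int} (h1 : 1 ≤ v) (h2 : v ≤ N) :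
    v ∈ (List.range N.toNat).map (fun (j : Nat) => N - (j : Int)) := by
  refine List.mem_map.mpr ⟨(N - v).toNat, List.mem_range.mpr ?_, ?_⟩ <;> omega

lemma pvMain (k : Int) (tangerine : List Int) : solution k tangerine = solution_alt k tangerine := by
  have hdic : tangerine.foldl
      (fun d i => if d.contains i then d.modify i 0 (· + 1) else d.insert i 1) PySem.Dict.empty
      = PySem.Dict.counter tangerine := by
    rw [PySem.Dict.counter_eq_foldl]
    refine PySem.List.foldl_congr_mem _ _ _ _ ?_
    intro d i _
    by_cases h : d.contains i = true
    · rw [if_pos h]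
    · rw [if_neg h]
      simp only [PySem.Dict.modify]
      rw [PySem.Dict.getD_of_not_contains _ _ (by simpa using h)]
      norm_num
  have hfreq : tangerine.foldl (fun d t => d.insert t (d.getD t 0 + 1)) PySem.Dict.empty
      = PySem.Dict.counter tangerine := PySem.Dict.foldl_insert_getD_add_one_eq_counter tangerine
  set vs : List Int := (PySem.Dict.counter tangerine).values with hvs
  have hbuckets : vs.foldl (fun d c => d.insert c (d.getD c 0 + 1)) PySem.Dict.empty
      = PySem.Dict.counter vs := PySem.Dict.foldl_insert_getD_add_one_eq_counter vs
  set N : Int := (tangerine.length : Int) with hN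
  -- facts about vs: every frequency is between 1 and N
  have hvsmem : ∀ v ∈ vs, 1 ≤ v ∧ v ≤ N := by
    intro v hv
    rw [hvs] at hv
    simp only [PySem.Dict.values, PySem.Dict.items_counter, List.map_map, List.mem_map] at hv
    obtain ⟨x, hxmem, hxv⟩ := hv
    have hxt : x ∈ tangerine := (PySem.Set.mem_ofList _ _).mp hxmem
    have h1 : 0 < tangerine.count x := List.count_pos_iff.mpr hxt
    have h2 : tangerine.count x ≤ tangerine.length := List.count_le_length ..
    simp only [Function.comp_apply] at hxv
    rw [← hxv, hN]
    omega
  -- the descending range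
  set cs : List Int := (List.range N.toNat).map (fun (j : Nat) => N - (j : Int)) with hcs
  have hcspos : ∀ c ∈ cs, 0 < c := by
    intro c hc
    rw [hcs] at hc
    obtain ⟨j, hj, rfl⟩ := List.mem_map.mp hc
    have := List.mem_range.mp hj
    omega
  -- the two count lists
  set L : List Int := (PySem.List.sorted (PySem.Dict.counter tangerine).items (fun item => item.2) true).map Prod.snd with hL
  set J : List Int := cs.flatMap (fun c => List.replicate (vs.count c) c) with hJ
  have hLperm : L.Perm vs := by
    rw [hL, hvs]
    exact (PySem.List.sorted_perm _ _ _).map Prod.snd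
  have hJperm : J.Perm vs := by
    rw [hJ]
    refine pvCountPerm vs cs ((pvDesc_pairwise N).imp ne_of_gt) ?_
    intro v hv
    exact pvDesc_mem (hvsmem v hv).1 (hvsmem v hv).2
  have hLpw : L.Pairwise (· ≥ ·) := by
    rw [hL, List.pairwise_map]
    exact PySem.List.sorted_pairwise_rev _ _
  have hJpw : J.Pairwise (· ≥ ·) := pvPairwiseFlat _ cs (pvDesc_pairwise N)
  have hLJ : L = J := by
    refine List.Perm.eq_of_pairwise ?_ hLpw hJpw (hLperm.trans hJperm.symm)
    intro a b _ _ h1 h2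
    omega
  -- assemble
  simp only [solution, solution_alt, hdic, hfreq, hbuckets, ← hvs]
  rw [pvLoopA_eq, ← hL]
  rw [pvPyRange_desc, ← hN, ← hcs]
  rw [pvLoopB_eq]
  · have hflat : cs.flatMap (fun c => List.replicate ((PySem.Dict.counter vs).getD c 0).toNat c) = J := by
      rw [hJ]
      simp only [PySem.Dict.getD_counter, Int.toNat_natCast]
    rw [hflat, hLJ]
  · intro c
    rw [PySem.Dict.getD_counter]
    exact Int.natCast_nonneg _
  · exact hcspos

-- ===== VERDICT (by name: the statement is the Claim_ definition above) =====
theorem solution_spec : Claim_equal_solution := by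
  intro k tangerine _ _
  unfold Spec_solution
  exact pvMain k tangerine
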